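-- pv_equiv track=rewrite | github.com/CodingSylvi/AdventOfCode2022 | day10/cathodeRayTube2.py | X2Sprite
-- ===== SOURCE A (Python) =====
-- def X2Sprite(X):
--     spritePosition = ""
--     for i in range(1, 41):
--         if i == X or i == X+1 or i == X+2:
--             spritePosition += "#"
--         else:
--             spritePosition += "."
--     return spritePosition
-- ===== SOURCE B (Python) =====
-- def X2Sprite(X):
--     line = ["."] * 40
--     for p in (X, X + 1, X + 2):
--         if 1 <= p <= 40:
--             line[p - 1] = "#"
--     return "".join(line)
-- ===== Notes on version B (the rewrite author's own statement) =====
-- stated objective: alternative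
-- what changed: Replaces the per-position conditional scan with string concatenation by a preallocated fixed-width buffer into which at most three '#' pixels are scattered, then joined once.
import Mathlib
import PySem

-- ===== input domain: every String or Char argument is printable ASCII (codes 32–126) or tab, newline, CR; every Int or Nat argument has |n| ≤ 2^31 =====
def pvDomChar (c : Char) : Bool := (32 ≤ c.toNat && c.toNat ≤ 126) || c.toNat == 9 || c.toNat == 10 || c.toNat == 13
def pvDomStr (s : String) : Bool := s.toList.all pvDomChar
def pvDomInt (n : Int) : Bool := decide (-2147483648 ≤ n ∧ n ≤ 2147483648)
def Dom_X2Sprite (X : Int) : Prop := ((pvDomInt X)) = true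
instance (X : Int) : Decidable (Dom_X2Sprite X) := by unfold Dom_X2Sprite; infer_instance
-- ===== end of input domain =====

-- B builds a preallocated fixed-width buffer and scatters at most three '#' writes into it,
-- instead of A's per-position scan that appends one character per position.


-- ===== PORT A =====
-- spritePosition accumulates characters; modelled as a List Char folded over range(1,41),
-- turned into a String at the end (exact: Python '+=' on str appends characters in order).
def X2Sprite (X : Int) : String :=
  String.ofList ((PySem.List.pyRange 1 41 1).foldl
    (fun acc i => acc ++ (if i = X ∨ i = X + 1 ∨ i = X + 2 then ['#'] else ['.'])) [])

-- ===== PORT B =====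
-- line = ['.']*40; scatter writes at p-1 for p in (X, X+1, X+2) when 1 <= p <= 40; join.
def X2Sprite_alt (X : Int) : String :=
  String.ofList (([X, X + 1, X + 2]).foldl
    (fun line p => if 1 ≤ p ∧ p ≤ 40 then line.set (p - 1).toNat '#' else line)
    (List.replicate 40 '.'))

-- ===== PRECONDITION & SPEC =====
def Spec_X2Sprite (X : Int) (out : String) : Prop := out = X2Sprite_alt X
instance (X : Int) (out : String) : Decidable (Spec_X2Sprite X out) := by unfold Spec_X2Sprite; infer_instance

-- ===== CLAIM (what is proved, stated in full; the proofs are below) =====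
def Claim_equal_X2Sprite : Prop := ∀ (X : Int), Dom_X2Sprite X → Spec_X2Sprite X (X2Sprite X)

-- ===== LEMMAS AND PROOFS =====

-- A's fold yields all dots when no position in l can match X, X+1 or X+2.
lemma foldl_dots (X : Int) (l : List Int) (acc : List Char)
    (h : ∀ i ∈ l, ¬(i = X ∨ i = X + 1 ∨ i = X + 2)) :
    l.foldl (fun acc i => acc ++ (if i = X ∨ i = X + 1 ∨ i = X + 2 then ['#'] else ['.'])) acc
      = acc ++ List.replicate l.length '.' := by
  induction l generalizing acc with
  | nil => simp
  | cons a t ih =>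
    simp only [List.foldl_cons, List.length_cons]
    rw [if_neg (h a (by simp)), ih _ (fun i hi => h i (by simp [hi]))]
    simp [List.replicate_succ]

lemma out_of_range (X : Int) (h : X < -1 ∨ 40 < X) : X2Sprite X = X2Sprite_alt X := by
  have hr : PySem.List.pyRange 1 41 1 =
      [1,2,3,4,5,6,7,8,9,10,11,12,13,14,15,16,17,18,19,20,
       21,22,23,24,25,26,27,28,29,30,31,32,33,34,35,36,37,38,39,40] := by decide
  unfold X2Sprite X2Sprite_alt
  rw [hr, foldl_dots]
  · simp only [List.foldl_cons, List.foldl_nil]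
    rw [if_neg (by omega), if_neg (by omega), if_neg (by omega)]
    rfl
  · intro i hi
    fin_cases hi <;> omega

-- ===== VERDICT (by name: the statement is the Claim_ definition above) =====
theorem X2Sprite_spec : Claim_equal_X2Sprite := by
  intro X _
  show X2Sprite X = X2Sprite_alt X
  by_cases h : -1 ≤ X ∧ X ≤ 40
  · obtain ⟨h1, h2⟩ := h
    interval_cases X <;> decide
  · exact out_of_range X (by omega)
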